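-- pv_equiv track=rewrite | github.com/Eduardoccufcg/Programming-1 | jasei/jasei.py | sei_tocar_musica
-- ===== SOURCE A (Python) =====
-- def sei_tocar_musica(musica,acordes):
-- 	sei = 0
-- 	for d in range(len(musica)):
-- 		for j in range(len(acordes)):
-- 			if musica[d] == acordes[j]:
-- 				sei += 1
-- 	if sei == len(musica):
-- 		return True
-- 	else:
-- 		return False
-- ===== SOURCE B (Python) =====
-- def sei_tocar_musica(musica, acordes):
--     # Dot product of the two frequency tables over musica's distinct keys.
--     cm = {}
--     for x in musica:
--         cm[x] = cm.get(x, 0) + 1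
--     ca = {}
--     for x in acordes:
--         ca[x] = ca.get(x, 0) + 1
--     total = 0
--     for k, v in cm.items():
--         total += v * ca.get(k, 0)
--     return total == len(musica)
-- ===== Notes on version B (the rewrite author's own statement) =====
-- stated objective: faster
-- what changed: Replaces the nested index-by-index scan with two frequency dictionaries built in one pass each, then a single dot-product loop over musica's distinct keys.
import Mathlib
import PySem

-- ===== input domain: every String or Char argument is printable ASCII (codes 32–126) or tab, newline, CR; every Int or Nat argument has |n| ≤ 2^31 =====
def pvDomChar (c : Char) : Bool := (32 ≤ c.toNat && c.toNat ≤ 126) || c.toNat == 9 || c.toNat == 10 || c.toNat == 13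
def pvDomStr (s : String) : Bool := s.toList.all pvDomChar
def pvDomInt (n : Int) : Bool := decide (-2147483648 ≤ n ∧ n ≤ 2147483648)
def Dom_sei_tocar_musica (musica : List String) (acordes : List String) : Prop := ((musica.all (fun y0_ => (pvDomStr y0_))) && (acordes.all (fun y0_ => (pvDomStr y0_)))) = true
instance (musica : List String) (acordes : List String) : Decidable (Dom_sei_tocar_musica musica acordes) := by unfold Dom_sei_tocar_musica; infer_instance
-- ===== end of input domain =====

-- B replaces A's nested index scan with two one-pass frequency dictionaries and a
-- dot-product loop over musica's distinct keys (asymptotically faster).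

-- ===== PORT A =====
-- A: sei = nested index loops counting matching pairs; return sei == len(musica)
def sei_tocar_musica (musica : List String) (acordes : List String) : Bool :=
  if ((PySem.List.pyRange 0 musica.length 1).foldl (fun sei d =>
        (PySem.List.pyRange 0 acordes.length 1).foldl (fun sei j =>
          if PySem.List.pyGetD musica d "" == PySem.List.pyGetD acordes j "" then sei + 1
          else sei) sei) (0 : Int))
      == (musica.length : Int) then true else false

-- ===== PORT B =====
-- B: cm / ca are the frequency dicts of musica / acordes; total is the dot product
-- over cm's items; return total == len(musica)
def sei_tocar_musica_alt (musica : List String) (acordes : List String) : Bool :=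
  (PySem.Dict.items
      (musica.foldl (fun d x => d.insert x (d.getD x 0 + 1)) PySem.Dict.empty)).foldl
    (fun t kv => t + kv.2 *
      (acordes.foldl (fun d x => d.insert x (d.getD x 0 + 1))
        (PySem.Dict.empty : PySem.Dict String Int)).getD kv.1 0) (0 : Int)
  == (musica.length : Int)

-- ===== PRECONDITION & SPEC =====
def Spec_sei_tocar_musica (musica : List String) (acordes : List String) (out : Bool) : Prop := out = sei_tocar_musica_alt musica acordes
instance (musica : List String) (acordes : List String) (out : Bool) : Decidable (Spec_sei_tocar_musica musica acordes out) := by unfold Spec_sei_tocar_musica; infer_instance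

-- ===== CLAIM (what is proved, stated in full; the proofs are below) =====
def Claim_equal_sei_tocar_musica : Prop := ∀ (musica : List String) (acordes : List String), Dom_sei_tocar_musica musica acordes → Spec_sei_tocar_musica musica acordes (sei_tocar_musica musica acordes)

-- ===== LEMMAS AND PROOFS =====

-- inner loop of A: counting matches of m in l
theorem pvFoldlCount (l : List String) (m : String) :
    ∀ a : Int, l.foldl (fun s x => if m == x then s + 1 else s) a = a + (l.count m : Int) := by
  induction l with
  | nil => intro a; simp
  | cons x t ih =>
    intro a
    by_cases h : m = x
    · subst h
      simp only [List.foldl_cons, beq_self_eq_true, if_pos, ih, List.count_cons]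
      push_cast
      ring
    · have hx : (m == x) = false := by simp [h]
      have hx' : (x == m) = false := by simp [Ne.symm h]
      simp only [List.foldl_cons, hx, List.count_cons, hx', ih]
      push_cast
      ring

-- A's accumulator equals the sum over musica of acordes-counts
theorem pvA_eq (musica acordes : List String) :
    sei_tocar_musica musica acordes
      = (((musica.map (fun m => (acordes.count m : Int))).sum) == (musica.length : Int)) := by
  unfold sei_tocar_musica
  rw [PySem.List.foldl_pyRange_zero_pyGetD' musica ""
    (fun acc m => (PySem.List.pyRange 0 acordes.length 1).foldl
      (fun s j => if m == PySem.List.pyGetD acordes j "" then s + 1 else s) acc) 0]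
  have hinner : ∀ (acc : Int) (m : String), m ∈ musica →
      (PySem.List.pyRange 0 acordes.length 1).foldl
        (fun s j => if m == PySem.List.pyGetD acordes j "" then s + 1 else s) acc
      = acc + (acordes.count m : Int) := by
    intro acc m _
    rw [PySem.List.foldl_pyRange_zero_pyGetD' acordes ""
      (fun s x => if m == x then s + 1 else s) acc]
    exact pvFoldlCount acordes m acc
  have hcong : musica.foldl (fun acc m =>
        (PySem.List.pyRange 0 acordes.length 1).foldl
          (fun s j => if m == PySem.List.pyGetD acordes j "" then s + 1 else s) acc) 0
      = musica.foldl (fun acc m => acc + (acordes.count m : Int)) 0 :=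
    PySem.List.foldl_congr_mem musica _ _ 0 (fun acc m hm => hinner acc m hm)
  rw [hcong]
  rw [PySem.List.foldl_add]
  simp
  rfl

-- B's accumulator equals the dot product over musica's distinct keys
theorem pvB_eq (musica acordes : List String) :
    sei_tocar_musica_alt musica acordes
      = ((((PySem.Set.ofList musica).map
            (fun k => (musica.count k : Int) * (acordes.count k : Int))).sum)
          == (musica.length : Int)) := by
  unfold sei_tocar_musica_alt
  rw [PySem.Dict.foldl_insert_getD_add_one_eq_counter,
      PySem.Dict.foldl_insert_getD_add_one_eq_counter,
      PySem.Dict.items_counter]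
  rw [PySem.List.foldl_add]
  simp [PySem.Dict.getD_counter, Function.comp_def]

-- dot product of the frequency table with f equals the plain sum of f over l
theorem pvDot (l : List String) (f : String → Int) :
    ((PySem.Set.ofList l).map (fun k => (l.count k : Int) * f k)).sum = (l.map f).sum := by
  have hperm : List.Perm (PySem.Set.ofList l) l.dedup :=
    (List.perm_ext_iff_of_nodup (PySem.Set.nodup_ofList l) l.nodup_dedup).mpr
      (fun a => by simp [PySem.Set.mem_ofList, List.mem_dedup])
  rw [(hperm.map _).sum_eq]
  have h1 := Finset.sum_list_map_count l f
  have h3 : l.dedup.toFinset = l.toFinset := by ext a; simp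
  have h2 : (l.toFinset.sum fun m => l.count m • f m)
      = (l.dedup.map fun m => l.count m • f m).sum := by
    rw [← h3]
    exact List.sum_toFinset _ l.nodup_dedup
  rw [h1, h2]
  simp

-- ===== VERDICT (by name: the statement is the Claim_ definition above) =====
theorem sei_tocar_musica_spec : Claim_equal_sei_tocar_musica := by
  intro musica acordes _
  unfold Spec_sei_tocar_musica
  rw [pvA_eq, pvB_eq, pvDot]
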